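-- pv_equiv track=rewrite | github.com/oelbert/aoc_2023 | day1.py | get_number_from_mixed_text
-- ===== SOURCE A (Python) =====
-- alphanum = {
--     "zero": "0",
--     "one": "1",
--     "two": "2",
--     "three": "3",
--     "four": "4",
--     "five": "5",
--     "six": "6",
--     "seven": "7",
--     "eight": "8",
--     "nine": "9",
-- }
--
-- def get_number_from_mixed_text(text: str) -> str:
--     buff = ""
--     for character in text:
--         if character.isnumeric():
--             return character
--         else:
--             buff += character
--             for key in alphanum.keys():
--                 if key in buff:
--                     return alphanum[key]
-- ===== SOURCE B (Python) =====
-- # Different algorithm: instead of streaming through the text with a growing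
-- # buffer, B runs staged passes -- one str.find per spelled word to get each
-- # word's earliest completion index, takes the candidate with the smallest
-- # completion index, then lets the first literal digit win if it comes earlier.
-- # Correct because no spelled word is a suffix of another, so the earliest
-- # "event" (digit seen / word completed) is unique and is exactly what A returns.
-- _WORDS = {
--     "zero": "0",
--     "one": "1",
--     "two": "2",
--     "three": "3",
--     "four": "4",
--     "five": "5",
--     "six": "6",
--     "seven": "7",
--     "eight": "8",
--     "nine": "9",
-- }
--
-- def get_number_from_mixed_text(text: str) -> str:
--     best = None  # (completion index, value) of the best candidate so far
--     for word, digit in _WORDS.items():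
--         j = text.find(word)
--         if j != -1:
--             end = j + len(word) - 1
--             if best is None or end < best[0]:
--                 best = (end, digit)
--     for i, ch in enumerate(text):
--         if ch.isnumeric():
--             if best is None or i < best[0]:
--                 best = (i, ch)
--             break
--     return best[1] if best is not None else None
-- ===== Notes on version B (the rewrite author's own statement) =====
-- stated objective: faster
-- what changed: B replaces A's streaming scan with its ever-growing buffer and per-character substring rescans by staged passes: one str.find per spelled word yields each word's earliest completion index, the argmin candidate is kept, and the first literal digit wins if it appears earlier (valid because no spelled word is a suffix of another, so the earliest event is unique).
import Mathlib
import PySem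

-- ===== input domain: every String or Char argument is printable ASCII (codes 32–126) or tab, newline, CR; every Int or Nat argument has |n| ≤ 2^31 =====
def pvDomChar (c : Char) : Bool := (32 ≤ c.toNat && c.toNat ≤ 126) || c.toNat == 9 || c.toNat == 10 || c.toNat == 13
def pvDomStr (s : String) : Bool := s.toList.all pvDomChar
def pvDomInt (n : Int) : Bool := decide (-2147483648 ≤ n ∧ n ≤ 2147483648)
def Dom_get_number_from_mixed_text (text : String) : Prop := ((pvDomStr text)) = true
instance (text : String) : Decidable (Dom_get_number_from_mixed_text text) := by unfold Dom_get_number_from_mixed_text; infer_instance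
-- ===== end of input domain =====

-- B replaces A's streaming scan (growing buffer, substring rescans) by staged
-- passes: one find per spelled word, argmin of completion indices, then the
-- first literal digit if earlier (objective: faster, measured).

-- the alphanum / _WORDS dict, in insertion order (keys as char lists)
def pvKeys : List (List Char × String) :=
  [(['z','e','r','o'], "0"), (['o','n','e'], "1"), (['t','w','o'], "2"),
   (['t','h','r','e','e'], "3"), (['f','o','u','r'], "4"), (['f','i','v','e'], "5"),
   (['s','i','x'], "6"), (['s','e','v','e','n'], "7"), (['e','i','g','h','t'], "8"),
   (['n','i','n','e'], "9")]

-- ===== PORT A =====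
-- inner 'for key in alphanum.keys(): if key in buff: return alphanum[key]'
def pvScanKeys (ks : List (List Char × String)) (buff : List Char) : Option String :=
  match ks with
  | [] => none
  | (k, v) :: rest => if PySem.Chars.isIn k buff then some v else pvScanKeys rest buff

-- outer 'for character in text' loop with the growing buffer
-- (character.isnumeric() = PySem.Chars.isdigit, exact on the printable-ASCII domain)
def pvLoopA : List Char → List Char → Option String
  | [], _ => none
  | c :: cs, buff =>
    if PySem.Chars.isdigit c then some (String.ofList [c])
    else
      match pvScanKeys pvKeys (buff ++ [c]) with
      | some v => some v
      | none => pvLoopA cs (buff ++ [c])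

def get_number_from_mixed_text (text : String) : Option String :=
  pvLoopA text.toList []

-- ===== PORT B =====
-- 'for word, digit in _WORDS.items(): j = text.find(word); … keep the smallest completion index'
def pvBestWord (ks : List (List Char × String)) (t : List Char)
    (best : Option (Int × String)) : Option (Int × String) :=
  match ks with
  | [] => best
  | (k, v) :: rest =>
    let j := PySem.Chars.find t k
    let best' :=
      if j = -1 then best
      else
        let e := j + k.length - 1
        match best with
        | none => some (e, v)
        | some (be, bv) => if e < be then some (e, v) else some (be, bv)
    pvBestWord rest t best'

-- 'for i, ch in enumerate(text): if ch.isnumeric(): … break'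
def pvDigitScan : List Char → Int → Option (Int × String) → Option (Int × String)
  | [], _, best => best
  | c :: cs, i, best =>
    if PySem.Chars.isdigit c then
      match best with
      | none => some (i, String.ofList [c])
      | some (be, bv) => if i < be then some (i, String.ofList [c]) else some (be, bv)
    else pvDigitScan cs (i + 1) best

def get_number_from_mixed_text_alt (text : String) : Option String :=
  (pvDigitScan text.toList 0 (pvBestWord pvKeys text.toList none)).map Prod.snd

-- ===== PRECONDITION & SPEC =====
def Spec_get_number_from_mixed_text (text : String) (out : Option String) : Prop := out = get_number_from_mixed_text_alt text
instance (text : String) (out : Option String) : Decidable (Spec_get_number_from_mixed_text text out) := by unfold Spec_get_number_from_mixed_text; infer_instance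

-- ===== CLAIM (what is proved, stated in full; the proofs are below) =====
def Claim_equal_get_number_from_mixed_text : Prop := ∀ (text : String), Dom_get_number_from_mixed_text text → Spec_get_number_from_mixed_text text (get_number_from_mixed_text text)

-- ===== LEMMAS AND PROOFS =====

-- shape facts about the ten keys (decided once; stated on the Bool .all form
-- because kernel evaluation of the bundled ∀-instance overflows)
lemma pvKeys_nonempty : ∀ kv ∈ pvKeys, kv.1 ≠ [] := by decide

lemma pvKeys_no_digit_bool :
    pvKeys.all (fun kv => kv.1.all (fun ch => !PySem.Chars.isdigit ch)) = true := by rfl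

lemma pvKeys_no_digit : ∀ kv ∈ pvKeys, ∀ ch ∈ kv.1, PySem.Chars.isdigit ch = false := by
  have h := pvKeys_no_digit_bool
  simp only [List.all_eq_true, Bool.not_eq_true'] at h
  exact h

lemma pvKeys_no_suffix_bool :
    pvKeys.all (fun kv => pvKeys.all (fun kv' =>
      (!kv.1.isSuffixOf kv'.1) || (decide (kv = kv')))) = true := by rfl

lemma pvKeys_no_suffix : ∀ kv ∈ pvKeys, ∀ kv' ∈ pvKeys, kv.1 <:+ kv'.1 → kv = kv' := by
  have h := pvKeys_no_suffix_bool
  simp only [List.all_eq_true, Bool.or_eq_true, Bool.not_eq_true', decide_eq_true_eq] at h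
  intro kv hkv kv' hkv' hsuf
  rcases h kv hkv kv' hkv' with hfalse | heq
  · exact absurd (List.isSuffixOf_iff_suffix.mpr hsuf) (by simp [hfalse])
  · exact heq

-- a nonempty suffix of l ++ [c] contains c
lemma suffix_last_mem {k l : List Char} {c : Char} (h : k <:+ l ++ [c]) (hk : k ≠ []) :
    c ∈ k := by
  obtain ⟨s, hs⟩ := h
  rcases List.eq_nil_or_concat k with rfl | ⟨k', d, rfl⟩
  · exact absurd rfl hk
  · have heq : (s ++ k') ++ [d] = l ++ [c] := by
      simpa [List.concat_eq_append, List.append_assoc] using hs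
    have hd : d = c := by
      have := congrArg List.getLast? heq
      simpa using this
    subst hd; simp

-- A's inner scan: none iff no key occurs in the buffer
lemma pvScanKeys_eq_none_iff (ks : List (List Char × String)) (buff : List Char) :
    pvScanKeys ks buff = none ↔ ∀ kv ∈ ks, ¬ kv.1 <:+: buff := by
  induction ks with
  | nil => simp [pvScanKeys]
  | cons kv rest ih =>
    obtain ⟨k, v⟩ := kv
    simp only [pvScanKeys]
    by_cases h : PySem.Chars.isIn k buff = true
    · rw [if_pos h]
      exact iff_of_false (by simp)
        (fun hall => hall (k, v) List.mem_cons_self ((PySem.Chars.isIn_iff_infix k buff).mp h))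
    · have hfalse := (PySem.Chars.isIn_eq_false_iff k buff).mp (Bool.eq_false_iff.mpr h)
      rw [if_neg h, ih]
      constructor
      · intro hall kv' hkv'
        rcases List.mem_cons.mp hkv' with heq | hmem
        · rw [heq]; exact hfalse
        · exact hall kv' hmem
      · intro hall kv' hmem
        exact hall kv' (List.mem_cons_of_mem _ hmem)

-- A's inner scan: soundness of a hit
lemma pvScanKeys_eq_some (ks : List (List Char × String)) (buff : List Char) (v : String)
    (h : pvScanKeys ks buff = some v) : ∃ k, (k, v) ∈ ks ∧ k <:+: buff := by
  induction ks with
  | nil => simp [pvScanKeys] at h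
  | cons kv rest ih =>
    obtain ⟨k, v'⟩ := kv
    simp only [pvScanKeys] at h
    by_cases hin : PySem.Chars.isIn k buff = true
    · rw [if_pos hin] at h
      obtain rfl : v' = v := by simpa using h
      exact ⟨k, List.mem_cons_self, (PySem.Chars.isIn_iff_infix k buff).mp hin⟩
    · rw [if_neg hin] at h
      obtain ⟨k', hmem, hinf⟩ := ih h
      exact ⟨k', List.mem_cons_of_mem _ hmem, hinf⟩

-- a new occurrence created by appending one char must end at the new char
lemma infix_concat_of_not_infix {k buff : List Char} {c : Char}
    (hnot : ¬ k <:+: buff) (h : k <:+: buff ++ [c]) : k <:+ buff ++ [c] := by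
  obtain ⟨s, t, hst⟩ := h
  rcases List.eq_nil_or_concat t with rfl | ⟨t', c', rfl⟩
  · exact ⟨s, by simpa using hst⟩
  · exfalso
    apply hnot
    have heq : ((s ++ k) ++ t') ++ [c'] = buff ++ [c] := by
      simpa [List.concat_eq_append, List.append_assoc] using hst
    have h2 := List.append_inj' heq (by rfl)
    exact ⟨s, t', by simpa [List.append_assoc] using h2.1⟩

-- find localises an occurrence: the key is an infix of the prefix ending at its completion index
lemma find_infix_take {t k : List Char} (hne : PySem.Chars.find t k ≠ -1) :
    k <:+: t.take ((PySem.Chars.find t k).toNat + k.length) := by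
  have hpos : 0 ≤ PySem.Chars.find t k := by
    rw [PySem.Chars.find_nonneg_iff]
    exact (PySem.Chars.find_ne_neg_one_iff t k).mp hne
  obtain ⟨hpre, -⟩ := PySem.Chars.find_spec (s := t) (sub := k) hpos
  obtain ⟨r, hr⟩ := hpre
  have htake : t.take ((PySem.Chars.find t k).toNat + k.length) =
      t.take (PySem.Chars.find t k).toNat ++ k := by
    rw [List.take_add, ← hr]
    congr 1
    exact List.take_left' rfl
  exact ⟨t.take (PySem.Chars.find t k).toNat, [], by simp [htake]⟩

-- first occurrence of a fresh suffix: find of a key that ends exactly at the last char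
lemma find_of_fresh_suffix {buff : List Char} {c : Char} {cs k : List Char}
    (hk : k ≠ []) (hsuf : k <:+ buff ++ [c]) (hnot : ¬ k <:+: buff) :
    PySem.Chars.find (buff ++ c :: cs) k = (buff.length + 1 - k.length : Nat) := by
  have hlen : k.length ≤ buff.length + 1 := by
    have := hsuf.length_le; simpa using this
  set j0 : Nat := buff.length + 1 - k.length with hj0
  -- an occurrence at j0
  obtain ⟨s, hs⟩ := hsuf
  have hslen : s.length = j0 := by
    have := congrArg List.length hs
    simp at this; omega
  have hteq : buff ++ c :: cs = (buff ++ [c]) ++ cs := by simp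
  have hocc : k <+: (buff ++ c :: cs).drop j0 := by
    have h1 : buff ++ c :: cs = s ++ (k ++ cs) := by
      rw [hteq, ← hs, List.append_assoc]
    rw [h1, List.drop_left' hslen]
    exact ⟨cs, rfl⟩
  -- no occurrence strictly before j0
  have hnoearly : ∀ i, i < j0 → ¬ k <+: (buff ++ c :: cs).drop i := by
    intro i hi hkpre
    apply hnot
    obtain ⟨r, hr⟩ := hkpre
    have hbound : i + k.length ≤ buff.length := by omega
    have htk : (buff ++ c :: cs).take (i + k.length) =
        (buff ++ c :: cs).take i ++ k := by
      rw [List.take_add, ← hr]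
      congr 1
      exact List.take_left' rfl
    have htb : (buff ++ c :: cs).take (i + k.length) = buff.take (i + k.length) := by
      rw [List.take_append_of_le_length hbound]
    have hsufk : k <:+ buff.take (i + k.length) := by
      rw [← htb, htk]; exact ⟨_, rfl⟩
    exact hsufk.isInfix.trans (List.take_prefix _ _).isInfix
  -- find is exactly j0
  have hinf : k <:+: buff ++ c :: cs := by
    obtain ⟨r, hr⟩ := hocc
    exact ⟨(buff ++ c :: cs).take j0, r, by rw [List.append_assoc, hr, List.take_append_drop]⟩
  have hpos : 0 ≤ PySem.Chars.find (buff ++ c :: cs) k :=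
    (PySem.Chars.find_nonneg_iff _ _).mpr hinf
  obtain ⟨hpre, hmin⟩ := PySem.Chars.find_spec (s := buff ++ c :: cs) (sub := k) hpos
  have hft : (PySem.Chars.find (buff ++ c :: cs) k).toNat = j0 := by
    rcases Nat.lt_trichotomy (PySem.Chars.find (buff ++ c :: cs) k).toNat j0 with h | h | h
    · exact absurd hpre (hnoearly _ h)
    · exact h
    · exact absurd hocc (hmin _ h)
  omega

-- no key can occur wholly inside the processed prefix
lemma no_early_end {buff : List Char} {c : Char} {cs k : List Char} (hk : k ≠ [])
    (hnot : ¬ k <:+: buff) (hnotc : ¬ k <:+: buff ++ [c])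
    (hfind : PySem.Chars.find (buff ++ c :: cs) k ≠ -1) :
    (buff.length : Int) < PySem.Chars.find (buff ++ c :: cs) k + k.length - 1 := by
  have hpos : 0 ≤ PySem.Chars.find (buff ++ c :: cs) k := by
    rw [PySem.Chars.find_nonneg_iff]
    exact (PySem.Chars.find_ne_neg_one_iff _ _).mp hfind
  have hklen : 1 ≤ k.length := List.length_pos_iff.mpr hk
  set j : Nat := (PySem.Chars.find (buff ++ c :: cs) k).toNat with hj
  have hsuftake : k <:+: (buff ++ c :: cs).take (j + k.length) := find_infix_take hfind
  by_contra hle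
  rw [not_lt] at hle
  have hjb : j + k.length ≤ buff.length + 1 := by omega
  rcases Nat.lt_or_ge (j + k.length) (buff.length + 1) with hlt | hge
  · -- the occurrence lies wholly inside buff
    apply hnot
    have : (buff ++ c :: cs).take (j + k.length) = buff.take (j + k.length) :=
      List.take_append_of_le_length (by omega)
    exact (this ▸ hsuftake).trans (List.take_prefix _ _).isInfix
  · -- the occurrence is buff ++ [c] itself
    apply hnotc
    have hj1 : j + k.length = buff.length + 1 := by omega
    have : (buff ++ c :: cs).take (j + k.length) = buff ++ [c] := by
      rw [hj1]
      have : buff ++ c :: cs = (buff ++ [c]) ++ cs := by simp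
      rw [this, List.take_append_of_le_length (by simp), List.take_of_length_le (by simp)]
    exact this ▸ hsuftake

-- B's word pass: stays put once every remaining candidate ends no earlier
lemma pvBestWord_stay (ks : List (List Char × String)) (t : List Char) (m : Int) (v : String)
    (h : ∀ kv ∈ ks, PySem.Chars.find t kv.1 = -1 ∨ m ≤ PySem.Chars.find t kv.1 + kv.1.length - 1) :
    pvBestWord ks t (some (m, v)) = some (m, v) := by
  induction ks with
  | nil => rfl
  | cons kv rest ih =>
    obtain ⟨k, v'⟩ := kv
    have hrest := fun kv hkv => h kv (List.mem_cons_of_mem _ hkv)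
    by_cases hj : PySem.Chars.find t k = -1
    · simp only [pvBestWord, hj, if_pos]
      exact ih hrest
    · have hm : m ≤ PySem.Chars.find t k + k.length - 1 := by
        rcases h (k, v') List.mem_cons_self with h' | h'
        · exact absurd h' hj
        · exact h'
      simp only [pvBestWord, if_neg hj]
      rw [if_neg (by omega)]
      exact ih hrest

-- B's word pass: reaches the unique minimal candidate
lemma pvBestWord_reach (t : List Char) (m : Int) (v : String) :
    ∀ (ks : List (List Char × String)) (b : Option (Int × String)),
    (∀ kv ∈ ks, PySem.Chars.find t kv.1 = -1 ∨ m ≤ PySem.Chars.find t kv.1 + kv.1.length - 1) →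
    (∀ kv ∈ ks, PySem.Chars.find t kv.1 ≠ -1 → PySem.Chars.find t kv.1 + kv.1.length - 1 = m → kv.2 = v) →
    (∃ kv ∈ ks, PySem.Chars.find t kv.1 ≠ -1 ∧ PySem.Chars.find t kv.1 + kv.1.length - 1 = m) →
    (b = none ∨ ∃ e' v', b = some (e', v') ∧ m < e') →
    pvBestWord ks t b = some (m, v) := by
  intro ks
  induction ks with
  | nil => rintro b - - ⟨kv, hkv, -⟩ -; exact absurd hkv (List.not_mem_nil)
  | cons kv rest ih =>
    obtain ⟨k, v'⟩ := kv
    intro b hall hval hex hb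
    have hallr := fun kv hkv => hall kv (List.mem_cons_of_mem _ hkv)
    have hvalr := fun kv hkv => hval kv (List.mem_cons_of_mem _ hkv)
    by_cases hj : PySem.Chars.find t k = -1
    · simp only [pvBestWord, hj, if_pos]
      refine ih b hallr hvalr ?_ hb
      obtain ⟨kv', hkv', hne', hend'⟩ := hex
      rcases List.mem_cons.mp hkv' with rfl | hmem
      · exact absurd hj hne'
      · exact ⟨kv', hmem, hne', hend'⟩
    · have hm : m ≤ PySem.Chars.find t k + k.length - 1 := by
        rcases hall (k, v') List.mem_cons_self with h' | h'
        · exact absurd h' hj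
        · exact h'
      simp only [pvBestWord, if_neg hj]
      by_cases he : PySem.Chars.find t k + k.length - 1 = m
      · -- this entry is the minimal candidate; its value must be v
        have hv' : v' = v := hval (k, v') List.mem_cons_self hj he
        subst hv'
        rcases hb with rfl | ⟨e', v'', rfl, hlt⟩
        · dsimp only
          rw [he]
          exact pvBestWord_stay rest t m v' hallr
        · dsimp only
          rw [if_pos (by omega), he]
          exact pvBestWord_stay rest t m v' hallr
      · -- this entry ends strictly later than m
        have hgt : m < PySem.Chars.find t k + k.length - 1 := lt_of_le_of_ne hm (Ne.symm he)
        have hexr : ∃ kv ∈ rest, PySem.Chars.find t kv.1 ≠ -1 ∧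
            PySem.Chars.find t kv.1 + kv.1.length - 1 = m := by
          obtain ⟨kv', hkv', hne', hend'⟩ := hex
          rcases List.mem_cons.mp hkv' with rfl | hmem
          · exact absurd hend' he
          · exact ⟨kv', hmem, hne', hend'⟩
        rcases hb with rfl | ⟨e', v'', rfl, hlt⟩
        · exact ih _ hallr hvalr hexr (Or.inr ⟨_, _, rfl, hgt⟩)
        · dsimp only
          by_cases hlt' : PySem.Chars.find t k + (k.length : Int) - 1 < e'
          · rw [if_pos hlt']
            exact ih _ hallr hvalr hexr (Or.inr ⟨_, _, rfl, hgt⟩)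
          · rw [if_neg hlt']
            exact ih _ hallr hvalr hexr (Or.inr ⟨_, _, rfl, hlt⟩)

-- B's word pass from none: none when no key occurs at all
lemma pvBestWord_none (ks : List (List Char × String)) (t : List Char)
    (h : ∀ kv ∈ ks, ¬ kv.1 <:+: t) : pvBestWord ks t none = none := by
  induction ks with
  | nil => rfl
  | cons kv rest ih =>
    obtain ⟨k, v⟩ := kv
    have hj : PySem.Chars.find t k = -1 :=
      (PySem.Chars.find_eq_neg_one_iff t k).mpr (h (k, v) List.mem_cons_self)
    simp only [pvBestWord, hj, if_pos]
    exact ih fun kv hkv => h kv (List.mem_cons_of_mem _ hkv)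

-- B's word pass: soundness of a hit (general accumulator)
lemma pvBestWord_sound_aux (ks : List (List Char × String)) (t : List Char) :
    ∀ (b : Option (Int × String)) (e : Int) (v : String),
    pvBestWord ks t b = some (e, v) →
    b = some (e, v) ∨ ∃ kv ∈ ks, PySem.Chars.find t kv.1 ≠ -1 ∧
      e = PySem.Chars.find t kv.1 + kv.1.length - 1 := by
  induction ks with
  | nil => intro b e v h; exact Or.inl h
  | cons kv rest ih =>
    obtain ⟨k, v'⟩ := kv
    intro b e v h
    simp only [pvBestWord] at h
    by_cases hj : PySem.Chars.find t k = -1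
    · rw [if_pos hj] at h
      rcases ih b e v h with h' | ⟨kv', hmem, hp⟩
      · exact Or.inl h'
      · exact Or.inr ⟨kv', List.mem_cons_of_mem _ hmem, hp⟩
    · rw [if_neg hj] at h
      have hhead : ∀ (w : String),
          (some (PySem.Chars.find t k + (k.length : Int) - 1, w) : Option (Int × String)) = some (e, v) →
          ∃ kv ∈ (k, v') :: rest, PySem.Chars.find t kv.1 ≠ -1 ∧
            e = PySem.Chars.find t kv.1 + kv.1.length - 1 := by
        intro w hw
        have he : PySem.Chars.find t k + (k.length : Int) - 1 = e := by
          simpa using congrArg (fun o => (o.map Prod.fst).getD 0) hw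
        exact ⟨(k, v'), List.mem_cons_self, hj, he.symm⟩
      cases b with
      | none =>
        dsimp only at h
        rcases ih _ e v h with h' | ⟨kv', hmem, hp⟩
        · exact Or.inr (hhead _ h')
        · exact Or.inr ⟨kv', List.mem_cons_of_mem _ hmem, hp⟩
      | some p =>
        obtain ⟨be, bv⟩ := p
        dsimp only at h
        by_cases hlt : PySem.Chars.find t k + (k.length : Int) - 1 < be
        · rw [if_pos hlt] at h
          rcases ih _ e v h with h' | ⟨kv', hmem, hp⟩
          · exact Or.inr (hhead _ h')
          · exact Or.inr ⟨kv', List.mem_cons_of_mem _ hmem, hp⟩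
        · rw [if_neg hlt] at h
          rcases ih _ e v h with h' | ⟨kv', hmem, hp⟩
          · exact Or.inl h'
          · exact Or.inr ⟨kv', List.mem_cons_of_mem _ hmem, hp⟩

-- B's word pass: soundness of a hit (some key completes at the returned index)
lemma pvBestWord_sound (ks : List (List Char × String)) (t : List Char) (e : Int) (v : String)
    (h : pvBestWord ks t none = some (e, v)) :
    ∃ kv ∈ ks, PySem.Chars.find t kv.1 ≠ -1 ∧ e = PySem.Chars.find t kv.1 + kv.1.length - 1 := by
  rcases pvBestWord_sound_aux ks t none e v h with h' | h'
  · exact absurd h' (by simp)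
  · exact h'

-- B's digit pass: skipping a digit-free block advances the index
lemma pvDigitScan_append (l1 l2 : List Char) (i : Int) (b : Option (Int × String))
    (h : ∀ x ∈ l1, PySem.Chars.isdigit x = false) :
    pvDigitScan (l1 ++ l2) i b = pvDigitScan l2 (i + l1.length) b := by
  induction l1 generalizing i with
  | nil => simp
  | cons x l1 ih =>
    have hx : PySem.Chars.isdigit x = false := h x List.mem_cons_self
    simp only [List.cons_append, pvDigitScan, hx, Bool.false_eq_true, if_false]
    have harith : i + 1 + (l1.length : Int) = i + ((x :: l1).length : Int) := by
      simp only [List.length_cons]; push_cast; ring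
    rw [ih (i + 1) (fun y hy => h y (List.mem_cons_of_mem _ hy)), harith]

-- B's digit pass: a candidate earlier than the scan start is final
lemma pvDigitScan_late (l : List Char) (i m : Int) (v : String) (h : m < i) :
    pvDigitScan l i (some (m, v)) = some (m, v) := by
  induction l generalizing i with
  | nil => rfl
  | cons x l ih =>
    simp only [pvDigitScan]
    by_cases hx : PySem.Chars.isdigit x = true
    · rw [if_pos hx, if_neg (by omega)]
    · rw [if_neg hx]
      exact ih (i + 1) (by omega)

-- in the digit branch no word can complete by the digit character
lemma bestWord_late {buff : List Char} {c : Char} {cs : List Char}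
    (hinv : ∀ kv ∈ pvKeys, ¬ kv.1 <:+: buff) (hd : PySem.Chars.isdigit c = true) :
    ∀ e v, pvBestWord pvKeys (buff ++ c :: cs) none = some (e, v) → (buff.length : Int) < e := by
  intro e v hbw
  obtain ⟨kv, hkv, hfne, he⟩ := pvBestWord_sound _ _ _ _ hbw
  have hnotc : ¬ kv.1 <:+: buff ++ [c] := by
    intro hinf'
    have hsuf' := infix_concat_of_not_infix (hinv _ hkv) hinf'
    have hc := suffix_last_mem hsuf' (pvKeys_nonempty _ hkv)
    have hnd := pvKeys_no_digit _ hkv c hc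
    rw [hd] at hnd
    exact Bool.true_eq_false.mp hnd
  have := no_early_end (pvKeys_nonempty _ hkv) (hinv _ hkv) hnotc hfne
  omega

-- main invariant: A's loop on the rest equals B's staged passes on the whole text
lemma loop_eq (cs : List Char) : ∀ buff : List Char,
    (∀ kv ∈ pvKeys, ¬ kv.1 <:+: buff) →
    (∀ x ∈ buff, PySem.Chars.isdigit x = false) →
    pvLoopA cs buff =
      (pvDigitScan (buff ++ cs) 0 (pvBestWord pvKeys (buff ++ cs) none)).map Prod.snd := by
  induction cs with
  | nil =>
    intro buff hinv hdig
    rw [List.append_nil, pvBestWord_none _ _ hinv]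
    have h2 : pvDigitScan (buff ++ []) 0 none = none := by
      rw [pvDigitScan_append buff [] 0 none hdig]; rfl
    rw [List.append_nil] at h2
    rw [h2]
    rfl
  | cons c cs' ih =>
    intro buff hinv hdig
    by_cases hd : PySem.Chars.isdigit c = true
    · -- A returns the digit; B's digit pass wins at index buff.length
      have hA : pvLoopA (c :: cs') buff = some (String.ofList [c]) := by
        simp [pvLoopA, hd]
      rw [hA]
      cases hbw : pvBestWord pvKeys (buff ++ c :: cs') none with
      | none =>
        rw [pvDigitScan_append buff (c :: cs') 0 none hdig]
        simp [pvDigitScan, hd]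
      | some p =>
        obtain ⟨e, v⟩ := p
        have he := bestWord_late hinv hd e v hbw
        rw [pvDigitScan_append buff (c :: cs') 0 _ hdig]
        simp only [pvDigitScan, hd, if_true]
        rw [if_pos (by omega)]
        rfl
    · have hd' : PySem.Chars.isdigit c = false := Bool.not_eq_true _ ▸ hd
      have hdigc : ∀ x ∈ buff ++ [c], PySem.Chars.isdigit x = false := by
        intro x hx
        rcases List.mem_append.mp hx with h | h
        · exact hdig x h
        · obtain rfl : x = c := by simpa using h
          exact hd'
      have hassoc : buff ++ c :: cs' = (buff ++ [c]) ++ cs' := by simp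
      cases hscan : pvScanKeys pvKeys (buff ++ [c]) with
      | some v =>
        -- A returns a spelled word completed exactly at the current character
        have hA : pvLoopA (c :: cs') buff = some v := by
          simp [pvLoopA, hd', hscan]
        obtain ⟨k, hkmem', hkinf⟩ := pvScanKeys_eq_some _ _ _ hscan
        have hkmem : ((k, v) : List Char × String) ∈ pvKeys := hkmem'
        have hknil : k ≠ [] := pvKeys_nonempty _ hkmem
        have hsuf : k <:+ buff ++ [c] := infix_concat_of_not_infix (hinv _ hkmem) hkinf
        have hfind := find_of_fresh_suffix (cs := cs') hknil hsuf (hinv _ hkmem)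
        have hklen : k.length ≤ buff.length + 1 := by simpa using hsuf.length_le
        have hek : PySem.Chars.find (buff ++ c :: cs') k + (k.length : Int) - 1
            = (buff.length : Int) := by rw [hfind]; omega
        have hfne : PySem.Chars.find (buff ++ c :: cs') k ≠ -1 := by rw [hfind]; omega
        have huniq : ∀ kv ∈ pvKeys, kv.1 <:+: buff ++ [c] → kv = (k, v) := by
          intro kv hkv hinf'
          have hsuf' : kv.1 <:+ buff ++ [c] := infix_concat_of_not_infix (hinv _ hkv) hinf'
          rcases List.suffix_or_suffix_of_suffix hsuf' hsuf with h | h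
          · exact pvKeys_no_suffix _ hkv _ hkmem h
          · exact (pvKeys_no_suffix _ hkmem _ hkv h).symm
        have hall : ∀ kv ∈ pvKeys, PySem.Chars.find (buff ++ c :: cs') kv.1 = -1 ∨
            (buff.length : Int) ≤ PySem.Chars.find (buff ++ c :: cs') kv.1 + kv.1.length - 1 := by
          intro kv hkv
          by_cases hj : PySem.Chars.find (buff ++ c :: cs') kv.1 = -1
          · exact Or.inl hj
          right
          by_cases hinf' : kv.1 <:+: buff ++ [c]
          · rcases huniq kv hkv hinf' with rfl
            exact le_of_eq hek.symm
          · exact le_of_lt (no_early_end (pvKeys_nonempty _ hkv) (hinv _ hkv) hinf' hj)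
        have hval : ∀ kv ∈ pvKeys, PySem.Chars.find (buff ++ c :: cs') kv.1 ≠ -1 →
            PySem.Chars.find (buff ++ c :: cs') kv.1 + kv.1.length - 1 = (buff.length : Int) →
            kv.2 = v := by
          intro kv hkv hj hend
          by_cases hinf' : kv.1 <:+: buff ++ [c]
          · rcases huniq kv hkv hinf' with rfl; rfl
          · have := no_early_end (pvKeys_nonempty _ hkv) (hinv _ hkv) hinf' hj
            omega
        have hbw := pvBestWord_reach (buff ++ c :: cs') (buff.length : Int) v pvKeys none
          hall hval ⟨(k, v), hkmem, hfne, hek⟩ (Or.inl rfl)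
        rw [hA, hbw, hassoc, pvDigitScan_append (buff ++ [c]) cs' 0 _ hdigc,
          pvDigitScan_late _ _ _ _ (by simp)]
        rfl
      | none =>
        have hA : pvLoopA (c :: cs') buff = pvLoopA cs' (buff ++ [c]) := by
          simp [pvLoopA, hd', hscan]
        have hinv' := (pvScanKeys_eq_none_iff _ _).mp hscan
        have := ih (buff ++ [c]) hinv' hdigc
        rw [hA, this]
        simp

-- ===== VERDICT (by name: the statement is the Claim_ definition above) =====
theorem get_number_from_mixed_text_spec : Claim_equal_get_number_from_mixed_text := by
  intro text _
  unfold Spec_get_number_from_mixed_text get_number_from_mixed_text get_number_from_mixed_text_alt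
  have h := loop_eq text.toList [] (by decide) (by simp)
  simpa using h
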